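-- pv_equiv track=rewrite | github.com/TatianaMou/INST326-Project | src/irlib.py | summarize_condition_stats
-- ===== SOURCE A (Python) =====
-- def summarize_condition_stats(conditions):
--     """Return dict condition -> count."""
--     stats = {}
--     if type(conditions) != list:
--         return stats
--     for c in conditions:
--         name = str(c).lower()
--         if name in stats:
--             stats[name] = stats[name] + 1
--         else:
--             stats[name] = 1
--     return stats
-- ===== SOURCE B (Python) =====
-- def summarize_condition_stats(conditions):
--     """Return dict condition -> count."""
--     if type(conditions) != list:
--         return {}
--     lowered = [str(c).lower() for c in conditions]
--     # group equal names into contiguous runs of a sorted copy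
--     counts = {}
--     run_name = None
--     run_len = 0
--     for name in sorted(lowered):
--         if name == run_name:
--             run_len += 1
--         else:
--             if run_len > 0:
--                 counts[run_name] = run_len
--             run_name = name
--             run_len = 1
--     if run_len > 0:
--         counts[run_name] = run_len
--     # emit in first-occurrence order, as dict insertion does in A
--     return {name: counts[name] for name in dict.fromkeys(lowered)}
-- ===== Notes on version B (the rewrite author's own statement) =====
-- stated objective: alternative
-- what changed: Replaces A's incremental hash-counter loop with sort-based grouping: lowercase once, sort a copy, compute each name's count as the length of its contiguous run in the sorted list, then emit the counts keyed in first-occurrence order via dict.fromkeys.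
import Mathlib
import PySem

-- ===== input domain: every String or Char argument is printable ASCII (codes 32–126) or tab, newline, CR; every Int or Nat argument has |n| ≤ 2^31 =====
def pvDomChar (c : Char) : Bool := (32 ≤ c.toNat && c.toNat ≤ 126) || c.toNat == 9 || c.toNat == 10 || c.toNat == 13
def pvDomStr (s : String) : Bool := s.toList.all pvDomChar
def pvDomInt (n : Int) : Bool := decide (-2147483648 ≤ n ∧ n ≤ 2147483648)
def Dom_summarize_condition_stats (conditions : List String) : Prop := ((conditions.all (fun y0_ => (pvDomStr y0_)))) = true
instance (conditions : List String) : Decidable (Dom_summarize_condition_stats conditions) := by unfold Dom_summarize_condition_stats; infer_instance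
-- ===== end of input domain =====

-- B replaces A's incremental hash-counter loop by sort-based grouping (sort a lowered copy,
-- take run lengths, re-key in first-occurrence order); alternative, not claimed faster.

-- ===== PORT A =====
-- the 'type(conditions) != list' guard is always false for conditions : List String, so the
-- early 'return stats' branch is unreachable and the loop is ported directly
def summarize_condition_stats (conditions : List String) : List (String × Int) :=
  let stats : PySem.Dict String Int := PySem.Dict.empty
  (conditions.foldl (fun stats c =>
      let name := PySem.Str.lower c
      if stats.contains name then stats.insert name (stats.getD name 0 + 1)
      else stats.insert name 1) stats).items

-- ===== PORT B =====
-- Source B's run-length loop over the sorted copy; run_name : Option String (None before the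
-- first run).  Python's unguarded 'counts[run_name] = run_len' only executes with
-- run_len > 0, where run_name is never None, so '(runName.getD "")' is exact there.
def pv_runscan (counts : PySem.Dict String Int) (runName : Option String) (runLen : Int) :
    List String → PySem.Dict String Int
  | [] => if 0 < runLen then counts.insert (runName.getD "") runLen else counts
  | name :: rest =>
    if some name == runName then pv_runscan counts runName (runLen + 1) rest
    else
      let counts' := if 0 < runLen then counts.insert (runName.getD "") runLen else counts
      pv_runscan counts' (some name) 1 rest

-- same type-guard note as for A; 'counts[name]' never raises (every deduped name has a run),
-- ported as getD with default 0
def summarize_condition_stats_alt (conditions : List String) : List (String × Int) :=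
  let lowered := conditions.map (fun c => PySem.Str.lower c)
  let counts := pv_runscan PySem.Dict.empty none 0 (PySem.List.sorted lowered (fun x => x) false)
  ((PySem.List.dedup lowered).foldl (fun d name => d.insert name (counts.getD name 0))
      (PySem.Dict.empty : PySem.Dict String Int)).items

-- ===== PRECONDITION & SPEC =====
def Spec_summarize_condition_stats (conditions : List String) (out : List (String × Int)) : Prop := out = summarize_condition_stats_alt conditions
instance (conditions : List String) (out : List (String × Int)) : Decidable (Spec_summarize_condition_stats conditions out) := by unfold Spec_summarize_condition_stats; infer_instance

-- ===== CLAIM (what is proved, stated in full; the proofs are below) =====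
def Claim_equal_summarize_condition_stats : Prop := ∀ (conditions : List String), Dom_summarize_condition_stats conditions → Spec_summarize_condition_stats conditions (summarize_condition_stats conditions)

-- ===== LEMMAS AND PROOFS =====

-- the run scan in mid-run state (current run r seen n times, r ≤ everything still to come):
-- its dict answers n + count of r, the run length for every later name, and d's value otherwise
theorem pv_runscan_getD_some (s : List String) (d : PySem.Dict String Int) (r : String)
    (n : Int) (hn : 0 < n) (hr : ∀ x ∈ s, r ≤ x) (hs : s.Pairwise (· ≤ ·)) (k : String) :
    (pv_runscan d (some r) n s).getD k 0
      = if k = r then n + (s.count r : Int)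
        else if 0 < s.count k then (s.count k : Int) else d.getD k 0 := by
  induction s generalizing d r n with
  | nil =>
    simp only [pv_runscan, if_pos hn, List.count_nil, Option.getD_some]
    by_cases hk : k = r
    · subst hk
      rw [PySem.Dict.getD_insert_self]
      simp
    · rw [PySem.Dict.getD_insert_of_ne (hne := hk)]
      simp [hk]
  | cons a t ih =>
    have hra : r ≤ a := hr a (by simp)
    have hrt : ∀ x ∈ t, r ≤ x := fun x hx => hr x (by simp [hx])
    have hat : ∀ x ∈ t, a ≤ x := fun x hx => (List.pairwise_cons.mp hs).1 x hx
    have hst : t.Pairwise (· ≤ ·) := (List.pairwise_cons.mp hs).2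
    rw [pv_runscan]
    by_cases har : a = r
    · subst har
      simp only [beq_self_eq_true, if_true]
      rw [ih d a (n + 1) (by omega) hrt hst]
      by_cases hk : k = a
      · subst hk
        simp [List.count_cons_self]
        ring
      · have hak : ¬ a = k := fun h => hk h.symm
        simp [hak, hk]
    · have hlt : r < a := lt_of_le_of_ne hra (fun h => har h.symm)
      rw [if_neg (by simp [har])]
      simp only [Option.getD_some]
      simp only [if_pos hn]
      rw [ih (d.insert r n) a 1 (by omega) hat hst]
      have hrcnt : t.count r = 0 := by
        rw [List.count_eq_zero]
        intro hmem
        exact absurd (hat r hmem) (not_le.mpr hlt)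
      by_cases hk : k = r
      · rw [hk]
        have hra' : ¬ r = a := fun h => har h.symm
        simp [hra', har, hrcnt, PySem.Dict.getD_insert_self]
      · by_cases hka : k = a
        · subst hka
          simp only [if_neg hk, List.count_cons_self]
          have hpos : (0:Nat) < t.count k + 1 := by omega
          rw [if_pos hpos]
          push_cast
          ring
        · have hcc : List.count k (a :: t) = List.count k t := by
            have hak : ¬ a = k := fun h => hka h.symm
            simp [hak]
          simp only [if_neg hka, if_neg hk, hcc]
          by_cases hmem : 0 < t.count k
          · rw [if_pos hmem, if_pos hmem]
          · rw [if_neg hmem, if_neg hmem]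
            rw [PySem.Dict.getD_insert_of_ne (hne := hk)]

-- from the initial state the scan's dict answers exactly the count in the scanned list
theorem pv_runscan_getD (s : List String) (hs : s.Pairwise (· ≤ ·)) (k : String) :
    (pv_runscan PySem.Dict.empty none 0 s).getD k 0 = (s.count k : Int) := by
  cases s with
  | nil => simp [pv_runscan, PySem.Dict.getD_empty]
  | cons a t =>
    rw [pv_runscan]
    rw [if_neg (by simp)]
    simp only [if_neg (by omega : ¬ (0:Int) < 0)]
    rw [pv_runscan_getD_some t PySem.Dict.empty a 1 (by omega)
      (fun x hx => (List.pairwise_cons.mp hs).1 x hx) (List.pairwise_cons.mp hs).2 k]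
    by_cases hk : k = a
    · subst hk
      simp [List.count_cons_self]
      ring
    · have hcc : List.count k (a :: t) = List.count k t := by
        have hak : ¬ a = k := fun h => hk h.symm
        simp [hak]
      simp only [if_neg hk, hcc]
      by_cases hmem : 0 < t.count k
      · rw [if_pos hmem]
      · rw [if_neg hmem, PySem.Dict.getD_empty]
        omega

-- folding constant-valued inserts leaves keys outside the list untouched
theorem pv_getD_foldl_insert_const_not_mem {κ ν : Type} [BEq κ] [LawfulBEq κ]
    (c : κ → ν) (l : List κ) (d : PySem.Dict κ ν) (k : κ) (h : k ∉ l) (dflt : ν) :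
    (l.foldl (fun d x => d.insert x (c x)) d).getD k dflt = d.getD k dflt := by
  induction l generalizing d with
  | nil => rfl
  | cons x t ih =>
    simp only [List.mem_cons, not_or] at h
    simp only [List.foldl_cons]
    rw [ih _ h.2, PySem.Dict.getD_insert_of_ne (hne := h.1)]

-- a key in the list ends with its constant value
theorem pv_getD_foldl_insert_const_mem {κ ν : Type} [BEq κ] [LawfulBEq κ]
    (c : κ → ν) (l : List κ) (d : PySem.Dict κ ν) (k : κ) (h : k ∈ l) (dflt : ν) :
    (l.foldl (fun d x => d.insert x (c x)) d).getD k dflt = c k := by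
  induction l generalizing d with
  | nil => simp at h
  | cons x t ih =>
    simp only [List.foldl_cons]
    by_cases hk : k ∈ t
    · exact ih _ hk
    · have hx : k = x := by
        cases List.mem_cons.mp h with
        | inl h => exact h
        | inr h => exact absurd h hk
      subst hx
      rw [pv_getD_foldl_insert_const_not_mem c t _ k hk dflt,
        PySem.Dict.getD_insert_self]

-- the items of the constant-valued insert fold, from empty
theorem pv_items_foldl_insert_const {κ ν : Type} [BEq κ] [LawfulBEq κ]
    (c : κ → ν) (l : List κ) (dflt : ν) :
    ((l.foldl (fun d x => d.insert x (c x)) (PySem.Dict.empty : PySem.Dict κ ν)).items)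
      = (PySem.Set.ofList l).map (fun k => (k, c k)) := by
  have hnd : (l.foldl (fun d x => d.insert x (c x)) (PySem.Dict.empty : PySem.Dict κ ν)).keys.Nodup :=
    PySem.Dict.nodup_keys_foldl_insert l _ _ PySem.Dict.nodup_keys_empty
  have hkeys : (l.foldl (fun d x => d.insert x (c x)) (PySem.Dict.empty : PySem.Dict κ ν)).keys
      = PySem.Set.ofList l := by
    rw [PySem.Dict.keys_foldl_insert]
    rfl
  rw [PySem.Dict.items_eq_map_keys _ hnd dflt, hkeys]
  refine List.map_congr_left (fun k hk => ?_)
  have hkl : k ∈ l := (PySem.Set.mem_ofList l k).mp hk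
  rw [pv_getD_foldl_insert_const_mem c l _ k hkl dflt]

-- A's branching step function is the getD-increment step
theorem pv_stepA_eq {κ : Type} [BEq κ] [LawfulBEq κ] :
    (fun (d : PySem.Dict κ Int) (x : κ) =>
        if d.contains x then d.insert x (d.getD x 0 + 1) else d.insert x 1)
      = fun d x => d.insert x (d.getD x 0 + 1) := by
  funext d x
  by_cases h : d.contains x = true
  · simp [h]
  · have h' : d.contains x = false := by
      cases hc : d.contains x
      · rfl
      · exact absurd hc h
    rw [PySem.Dict.getD_of_not_contains (h := h')]
    simp [h']

-- ===== VERDICT (by name: the statement is the Claim_ definition above) =====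
theorem summarize_condition_stats_spec : Claim_equal_summarize_condition_stats := by
  intro conditions _
  unfold Spec_summarize_condition_stats summarize_condition_stats summarize_condition_stats_alt
  simp only
  have hA : (List.foldl (fun (stats : PySem.Dict String Int) c =>
        let name := PySem.Str.lower c
        if stats.contains name then stats.insert name (stats.getD name 0 + 1)
        else stats.insert name 1) PySem.Dict.empty conditions)
      = (List.foldl (fun (stats : PySem.Dict String Int) name =>
          if stats.contains name then stats.insert name (stats.getD name 0 + 1)
          else stats.insert name 1) PySem.Dict.empty
          (conditions.map (fun c => PySem.Str.lower c))) :=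
    by rw [List.foldl_map]
  rw [hA, pv_stepA_eq, PySem.Dict.foldl_insert_getD_add_one_eq_counter,
    PySem.Dict.items_counter]
  set lowered := conditions.map (fun c => PySem.Str.lower c) with hlow
  rw [pv_items_foldl_insert_const
    (fun k => (pv_runscan PySem.Dict.empty none 0
        (PySem.List.sorted lowered (fun x => x) false)).getD k 0)
    (PySem.List.dedup lowered) 0]
  rw [PySem.List.dedup_eq_ofList, PySem.Set.ofList_ofList]
  refine List.map_congr_left (fun k hk => ?_)
  have hsorted : (PySem.List.sorted lowered (fun x => x) false).Pairwise (· ≤ ·) :=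
    PySem.List.sorted_pairwise lowered (fun x => x)
  rw [pv_runscan_getD _ hsorted k]
  have hperm : (PySem.List.sorted lowered (fun x => x) false).Perm lowered :=
    PySem.List.sorted_perm lowered (fun x => x) false
  rw [hperm.count_eq]
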